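-- pv_equiv track=rewrite | github.com/fullscreen-triangle/gospel | genomic_demo/meta_information_compression.py | _has_palindromic_patterns
-- ===== SOURCE A (Python) =====
-- from typing import Dict, List, Tuple, Any
--
-- def _has_palindromic_patterns(sequences: List[str]) -> bool:
--     """Check for palindromic patterns"""
--     for seq in sequences:
--         for i in range(len(seq)):
--             for j in range(i + 4, len(seq) + 1):  # Minimum palindrome length 4
--                 substr = seq[i:j]
--                 if substr == substr[::-1]:
--                     return True
--     return False
-- ===== SOURCE B (Python) =====
-- def _has_palindromic_patterns(sequences):
--     """Check for palindromic patterns (any palindromic substring of length >= 4).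
--
--     Any palindrome of length >= 4 contains a length-4 or length-5 palindrome
--     at its centre, so it suffices to scan windows of length 4 and 5.
--     """
--     for seq in sequences:
--         n = len(seq)
--         for i in range(n - 3):
--             if seq[i] == seq[i + 3] and seq[i + 1] == seq[i + 2]:
--                 return True
--             if i + 4 < n and seq[i] == seq[i + 4] and seq[i + 1] == seq[i + 3]:
--                 return True
--     return False
-- ===== Notes on version B (the rewrite author's own statement) =====
-- stated objective: faster
-- what changed: Instead of testing every substring of every length for being a palindrome, B scans only length-4 and length-5 windows, since any palindrome of length >= 4 contains a central palindrome of length 4 or 5.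
import Mathlib
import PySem

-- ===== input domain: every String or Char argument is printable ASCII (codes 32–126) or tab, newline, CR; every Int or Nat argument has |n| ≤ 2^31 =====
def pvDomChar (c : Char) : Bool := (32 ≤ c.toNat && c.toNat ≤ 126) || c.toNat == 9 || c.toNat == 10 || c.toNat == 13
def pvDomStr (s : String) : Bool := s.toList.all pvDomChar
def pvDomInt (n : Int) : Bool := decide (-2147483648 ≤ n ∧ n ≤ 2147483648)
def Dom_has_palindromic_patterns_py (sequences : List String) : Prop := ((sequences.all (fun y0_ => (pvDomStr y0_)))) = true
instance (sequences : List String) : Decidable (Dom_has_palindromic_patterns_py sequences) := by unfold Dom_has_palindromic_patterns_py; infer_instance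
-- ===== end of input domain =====

-- B scans only length-4 and length-5 windows (any palindrome of length ≥ 4 contains one centrally)
-- instead of A's all-substrings scan; same Boolean result, asymptotically less work per string.


-- ===== PORT A =====
-- Nested 'for' loops with 'return True' = List.any; seq[i:j] = PySem.List.slice;
-- substr[::-1] on a list of chars is reversal, ported as List.reverse (exact: slice? … none none (-1)).
def has_palindromic_patterns_py (sequences : List String) : Bool :=
  sequences.any (fun seq =>
    let l := seq.toList
    (PySem.List.pyRange 0 (l.length : Int) 1).any (fun i =>
      (PySem.List.pyRange (i + 4) ((l.length : Int) + 1) 1).any (fun j =>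
        let substr := PySem.List.slice l (some i) (some j)
        substr == substr.reverse)))

-- ===== PORT B =====
-- seq[i] with 0 ≤ i < len(seq) ported as PySem.List.pyGetD (always in range here).
def has_palindromic_patterns_py_alt (sequences : List String) : Bool :=
  sequences.any (fun seq =>
    let l := seq.toList
    (PySem.List.pyRange 0 ((l.length : Int) - 3) 1).any (fun i =>
      (PySem.List.pyGetD l i ' ' == PySem.List.pyGetD l (i + 3) ' '
        && PySem.List.pyGetD l (i + 1) ' ' == PySem.List.pyGetD l (i + 2) ' ')
      || (decide (i + 4 < (l.length : Int))
        && PySem.List.pyGetD l i ' ' == PySem.List.pyGetD l (i + 4) ' '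
        && PySem.List.pyGetD l (i + 1) ' ' == PySem.List.pyGetD l (i + 3) ' ')))

-- ===== PRECONDITION & SPEC =====
def Spec_has_palindromic_patterns_py (sequences : List String) (out : Bool) : Prop := out = has_palindromic_patterns_py_alt sequences
instance (sequences : List String) (out : Bool) : Decidable (Spec_has_palindromic_patterns_py sequences out) := by unfold Spec_has_palindromic_patterns_py; infer_instance

-- ===== CLAIM (what is proved, stated in full; the proofs are below) =====
def Claim_equal_has_palindromic_patterns_py : Prop := ∀ (sequences : List String), Dom_has_palindromic_patterns_py sequences → Spec_has_palindromic_patterns_py sequences (has_palindromic_patterns_py sequences)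

-- ===== LEMMAS AND PROOFS =====

-- 'the window of l starting at i of length m reads the same both ways', stated with getD
def palAt (l : List Char) (i m : Nat) : Prop :=
  ∀ k, k < m → l.getD (i + k) ' ' = l.getD (i + m - 1 - k) ' '

lemma pal_iff_getD (s : List Char) :
    s = s.reverse ↔ ∀ k, k < s.length → s.getD k ' ' = s.getD (s.length - 1 - k) ' ' := by
  constructor
  · intro h k hk
    conv_lhs => rw [h]
    rw [List.getD_eq_getElem s.reverse ' ' (by simpa using hk),
        List.getD_eq_getElem s ' ' (by omega)]
    simp [List.getElem_reverse]
  · intro h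
    apply List.ext_getElem (by simp)
    intro k hk _
    rw [List.getElem_reverse]
    have := h k hk
    rwa [List.getD_eq_getElem s ' ' hk, List.getD_eq_getElem s ' ' (by omega)] at this

lemma slice_pal_iff (l : List Char) (i m : Nat) (h : i + m ≤ l.length) :
    ((l.drop i).take m = ((l.drop i).take m).reverse) ↔ palAt l i m := by
  have hlen : ((l.drop i).take m).length = m := by
    simp [List.length_take, List.length_drop]; omega
  have hget : ∀ k, k < m → ((l.drop i).take m).getD k ' ' = l.getD (i + k) ' ' := by
    intro k hk
    rw [List.getD_eq_getElem _ ' ' (by omega), List.getD_eq_getElem l ' ' (by omega)]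
    simp [List.getElem_take, List.getElem_drop]
  rw [pal_iff_getD, hlen]
  constructor
  · intro hp k hk
    have := hp k hk
    rw [hget k hk, hget (m - 1 - k) (by omega)] at this
    have he : i + (m - 1 - k) = i + m - 1 - k := by omega
    rwa [he] at this
  · intro hp k hk
    rw [hget k hk, hget (m - 1 - k) (by omega)]
    have := hp k hk
    have he : i + (m - 1 - k) = i + m - 1 - k := by omega
    rw [he]
    exact this

lemma palAt4_iff (l : List Char) (i : Nat) :
    palAt l i 4 ↔ (l.getD i ' ' = l.getD (i + 3) ' ' ∧ l.getD (i + 1) ' ' = l.getD (i + 2) ' ') := by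
  constructor
  · intro h
    refine ⟨?_, ?_⟩
    · have := h 0 (by omega); simpa using this
    · have := h 1 (by omega)
      have he : i + 4 - 1 - 1 = i + 2 := by omega
      rwa [he] at this
  · rintro ⟨h1, h2⟩ k hk
    interval_cases k
    · simpa using h1
    · have he : i + 4 - 1 - 1 = i + 2 := by omega
      rw [he]; exact h2
    · have he : i + 4 - 1 - 2 = i + 1 := by omega
      rw [he]; exact h2.symm
    · have he : i + 4 - 1 - 3 = i := by omega
      rw [he]; exact h1.symm

lemma palAt5_iff (l : List Char) (i : Nat) :
    palAt l i 5 ↔ (l.getD i ' ' = l.getD (i + 4) ' ' ∧ l.getD (i + 1) ' ' = l.getD (i + 3) ' ') := by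
  constructor
  · intro h
    refine ⟨?_, ?_⟩
    · have := h 0 (by omega); simpa using this
    · have := h 1 (by omega)
      have he : i + 5 - 1 - 1 = i + 3 := by omega
      rwa [he] at this
  · rintro ⟨h1, h2⟩ k hk
    interval_cases k
    · simpa using h1
    · have he : i + 5 - 1 - 1 = i + 3 := by omega
      rw [he]; exact h2
    · have he : i + 5 - 1 - 2 = i + 2 := by omega
      rw [he]
    · have he : i + 5 - 1 - 3 = i + 1 := by omega
      rw [he]; exact h2.symm
    · have he : i + 5 - 1 - 4 = i := by omega
      rw [he]; exact h1.symm

lemma palAt_shrink (l : List Char) (i m : Nat) (hm : 2 ≤ m) (h : palAt l i m) :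
    palAt l (i + 1) (m - 2) := by
  intro k hk
  have := h (k + 1) (by omega)
  have e1 : i + (k + 1) = i + 1 + k := by omega
  have e2 : i + m - 1 - (k + 1) = i + 1 + (m - 2) - 1 - k := by omega
  rwa [e1, e2] at this

-- the key combinatorial fact: a palindromic window of length ≥ 4 contains a
-- length-4 window (if it fits in [0,n)) or a length-5 window
lemma window_of_palAt (l : List Char) :
    ∀ m, ∀ i, 4 ≤ m → i + m ≤ l.length → palAt l i m →
      ∃ i', (i' + 4 ≤ l.length ∧ palAt l i' 4) ∨ (i' + 5 ≤ l.length ∧ palAt l i' 5) := by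
  intro m
  induction m using Nat.strong_induction_on with
  | _ m ih =>
    intro i h4 hle hp
    rcases Nat.lt_or_ge m 6 with h6 | h6
    · rcases Nat.lt_or_ge m 5 with h5 | h5
      · have : m = 4 := by omega
        subst this
        exact ⟨i, Or.inl ⟨hle, hp⟩⟩
      · have : m = 5 := by omega
        subst this
        exact ⟨i, Or.inr ⟨hle, hp⟩⟩
    · exact ih (m - 2) (by omega) (i + 1) (by omega) (by omega) (palAt_shrink l i m (by omega) hp)

-- the existence form each port decides, per string
def hasPal (l : List Char) : Prop := ∃ i m : Nat, 4 ≤ m ∧ i + m ≤ l.length ∧ palAt l i m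

lemma a_char (l : List Char) :
    ((PySem.List.pyRange 0 (l.length : Int) 1).any (fun i =>
      (PySem.List.pyRange (i + 4) ((l.length : Int) + 1) 1).any (fun j =>
        let substr := PySem.List.slice l (some i) (some j)
        substr == substr.reverse))) = true ↔ hasPal l := by
  rw [List.any_eq_true]
  constructor
  · rintro ⟨i, hi, hinner⟩
    rw [List.any_eq_true] at hinner
    obtain ⟨j, hj, hpal⟩ := hinner
    rw [PySem.List.mem_pyRange_one] at hi hj
    simp only [beq_iff_eq] at hpal
    have h0i : 0 ≤ i := hi.1
    have h0j : 0 ≤ j := by omega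
    rw [PySem.List.slice_toNat l h0i h0j] at hpal
    refine ⟨i.toNat, j.toNat - i.toNat, by omega, by omega, ?_⟩
    rw [← slice_pal_iff l i.toNat (j.toNat - i.toNat) (by omega)]
    exact hpal
  · rintro ⟨i, m, h4, hle, hp⟩
    refine ⟨(i : Int), ?_, ?_⟩
    · rw [PySem.List.mem_pyRange_one]; constructor <;> [positivity; exact_mod_cast (by omega : i < l.length)]
    · rw [List.any_eq_true]
      refine ⟨((i + m : Nat) : Int), ?_, ?_⟩
      · rw [PySem.List.mem_pyRange_one]
        constructor
        · push_cast; omega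
        · push_cast; omega
      · simp only [beq_iff_eq]
        rw [PySem.List.slice_toNat l (by positivity) (by positivity)]
        have e1 : (↑i : Int).toNat = i := by omega
        have e2 : ((↑(i + m) : Int)).toNat = i + m := by omega
        rw [e1, e2]
        have e3 : i + m - i = m := by omega
        rw [e3, slice_pal_iff l i m hle]
        exact hp

lemma b_char (l : List Char) :
    ((PySem.List.pyRange 0 ((l.length : Int) - 3) 1).any (fun i =>
      (PySem.List.pyGetD l i ' ' == PySem.List.pyGetD l (i + 3) ' '
        && PySem.List.pyGetD l (i + 1) ' ' == PySem.List.pyGetD l (i + 2) ' ')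
      || (decide (i + 4 < (l.length : Int))
        && PySem.List.pyGetD l i ' ' == PySem.List.pyGetD l (i + 4) ' '
        && PySem.List.pyGetD l (i + 1) ' ' == PySem.List.pyGetD l (i + 3) ' '))) = true
    ↔ ∃ i : Nat, (i + 4 ≤ l.length ∧ palAt l i 4) ∨ (i + 5 ≤ l.length ∧ palAt l i 5) := by
  rw [List.any_eq_true]
  have hg : ∀ (j : Int), 0 ≤ j → j < (l.length : Int) →
      PySem.List.pyGetD l j ' ' = l.getD j.toNat ' ' := by
    intro j h0 hlt
    rw [PySem.List.pyGetD_eq_getElem l ' ' h0 hlt, List.getD_eq_getElem l ' ' (by omega)]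
  constructor
  · rintro ⟨i, hi, hcond⟩
    rw [PySem.List.mem_pyRange_one] at hi
    obtain ⟨h0, hlt⟩ := hi
    set a := i.toNat with ha
    have hia : i = (a : Int) := by omega
    have ha4 : a + 4 ≤ l.length := by omega
    simp only [Bool.or_eq_true, Bool.and_eq_true, beq_iff_eq, decide_eq_true_eq] at hcond
    rcases hcond with ⟨c1, c2⟩ | ⟨⟨hlt5, c1⟩, c2⟩
    · refine ⟨a, Or.inl ⟨ha4, ?_⟩⟩
      rw [palAt4_iff]
      rw [hg i h0 (by omega), hg (i + 3) (by omega) (by omega)] at c1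
      rw [hg (i + 1) (by omega) (by omega), hg (i + 2) (by omega) (by omega)] at c2
      have e3 : (i + 3).toNat = a + 3 := by omega
      have e1 : (i + 1).toNat = a + 1 := by omega
      have e2 : (i + 2).toNat = a + 2 := by omega
      rw [e3] at c1; rw [e1, e2] at c2
      exact ⟨c1, c2⟩
    · refine ⟨a, Or.inr ⟨by omega, ?_⟩⟩
      rw [palAt5_iff]
      rw [hg i h0 (by omega), hg (i + 4) (by omega) (by omega)] at c1
      rw [hg (i + 1) (by omega) (by omega), hg (i + 3) (by omega) (by omega)] at c2
      have e4 : (i + 4).toNat = a + 4 := by omega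
      have e1 : (i + 1).toNat = a + 1 := by omega
      have e3 : (i + 3).toNat = a + 3 := by omega
      rw [e4] at c1; rw [e1, e3] at c2
      exact ⟨c1, c2⟩
  · rintro ⟨a, hcase⟩
    have hlen : a + 4 ≤ l.length := by rcases hcase with ⟨h, _⟩ | ⟨h, _⟩ <;> omega
    refine ⟨(a : Int), ?_, ?_⟩
    · rw [PySem.List.mem_pyRange_one]
      constructor
      · positivity
      · push_cast; omega
    · simp only [Bool.or_eq_true, Bool.and_eq_true, beq_iff_eq, decide_eq_true_eq]
      have e0 : ((a : Int)).toNat = a := by omega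
      have e1 : ((a : Int) + 1).toNat = a + 1 := by omega
      have e2 : ((a : Int) + 2).toNat = a + 2 := by omega
      have e3 : ((a : Int) + 3).toNat = a + 3 := by omega
      have e4 : ((a : Int) + 4).toNat = a + 4 := by omega
      rcases hcase with ⟨h, hp⟩ | ⟨h, hp⟩
      · rw [palAt4_iff] at hp
        refine Or.inl ⟨?_, ?_⟩
        · rw [hg (a : Int) (by positivity) (by omega),
              hg ((a : Int) + 3) (by omega) (by omega), e0, e3]
          exact hp.1
        · rw [hg ((a : Int) + 1) (by omega) (by omega),
              hg ((a : Int) + 2) (by omega) (by omega), e1, e2]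
          exact hp.2
      · rw [palAt5_iff] at hp
        refine Or.inr ⟨⟨by omega, ?_⟩, ?_⟩
        · rw [hg (a : Int) (by positivity) (by omega),
              hg ((a : Int) + 4) (by omega) (by omega), e0, e4]
          exact hp.1
        · rw [hg ((a : Int) + 1) (by omega) (by omega),
              hg ((a : Int) + 3) (by omega) (by omega), e1, e3]
          exact hp.2

lemma hasPal_iff_window (l : List Char) :
    hasPal l ↔ ∃ i : Nat, (i + 4 ≤ l.length ∧ palAt l i 4) ∨ (i + 5 ≤ l.length ∧ palAt l i 5) := by
  constructor
  · rintro ⟨i, m, h4, hle, hp⟩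
    exact window_of_palAt l m i h4 hle hp
  · rintro ⟨i, ⟨h, hp⟩ | ⟨h, hp⟩⟩
    · exact ⟨i, 4, by omega, h, hp⟩
    · exact ⟨i, 5, by omega, h, hp⟩

-- ===== VERDICT (by name: the statement is the Claim_ definition above) =====
theorem has_palindromic_patterns_py_spec : Claim_equal_has_palindromic_patterns_py := by
  intro sequences _
  unfold Spec_has_palindromic_patterns_py has_palindromic_patterns_py has_palindromic_patterns_py_alt
  apply PySem.List.any_congr_mem
  intro seq _
  rw [Bool.eq_iff_iff, a_char seq.toList, b_char seq.toList]
  exact hasPal_iff_window seq.toList
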